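-- pv_equiv track=rewrite | github.com/valentin-correa/UTN-2024 | UTN/1er año/AyED/Python/Conversor de sistemas (anda bien).py | transformador_binario
-- ===== SOURCE A (Python) =====
-- def transformador_binario(sistema_1, num):
--     if sistema_1 == "binario":
--         return num
--     if sistema_1 == "decimal":
--         num = int(num, 10)
--     if sistema_1 == "hexadecimal":
--         num = int(num, 16)
--     if sistema_1 == "octal":
--         num = int(num, 8)
--     if num == 0:
--         return 0
--     binario = ""
--     while num > 0:
--         num_str = num%2
--         binario = str(num_str) + binario
--         num = num // 2
--     return binario
-- ===== SOURCE B (Python) =====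
-- def transformador_binario(sistema_1, num):
--     if sistema_1 == "binario":
--         return num
--     if sistema_1 == "decimal":
--         num = int(num, 10)
--     if sistema_1 == "hexadecimal":
--         num = int(num, 16)
--     if sistema_1 == "octal":
--         num = int(num, 8)
--     if num == 0:
--         return 0
--     bits = []
--     for i in range(num.bit_length() if num > 0 else 0):
--         bits.append(str((num >> i) & 1))
--     return "".join(reversed(bits))
-- ===== Notes on version B (the rewrite author's own statement) =====
-- stated objective: alternative
-- what changed: The divide-by-2 loop that prepends the least significant bit to a shrinking quotient is replaced by a bit_length-indexed pass that keeps num fixed and extracts each bit with shift-and-mask, appending LSB-first and joining the reversed list.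
-- outside the precondition, e.g. on transformador_binario('decimal', '0'): A returns 0, B returns 0
import Mathlib
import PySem

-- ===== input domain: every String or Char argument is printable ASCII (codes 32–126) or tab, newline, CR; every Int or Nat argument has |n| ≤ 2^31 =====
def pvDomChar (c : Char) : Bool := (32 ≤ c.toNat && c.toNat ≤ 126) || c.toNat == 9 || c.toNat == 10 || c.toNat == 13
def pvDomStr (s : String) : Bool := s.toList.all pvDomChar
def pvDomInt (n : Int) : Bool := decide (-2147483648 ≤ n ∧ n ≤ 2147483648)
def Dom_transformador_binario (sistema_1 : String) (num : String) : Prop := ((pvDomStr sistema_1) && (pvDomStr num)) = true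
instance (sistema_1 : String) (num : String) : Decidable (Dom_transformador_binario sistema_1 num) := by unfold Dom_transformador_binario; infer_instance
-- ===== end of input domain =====

-- B replaces A's divide-and-prepend while loop by a bit_length-indexed shift-and-mask pass
-- (LSB-first append, then join reversed); same value on every admitted input (objective: alternative).

-- ===== PORT A =====
-- A's while loop: 'binario' accumulated as a list of chars (str concatenation = list append).
def pvLoopA (num : Int) (binario : List Char) : List Char :=
  if 0 < num then
    pvLoopA (PySem.Int.floordiv num 2) (PySem.Int.toChars (PySem.Int.mod num 2) ++ binario)
  else binario
termination_by num.toNat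
decreasing_by
  rw [PySem.Int.floordiv_eq_ediv_of_pos (by omega : (0:Int) < 2)]
  omega

-- Python's three base-checks are sequential 'if's, but mutually exclusive (sistema_1 equals at
-- most one literal), so the if-chain below is exact; an unknown sistema_1 leaves num a str and
-- 'num > 0' raises TypeError (outside Pre_), ported as the 'none' arm.
def transformador_binario (sistema_1 : String) (num : String) : String :=
  if sistema_1 = "binario" then num
  else
    match
      (if sistema_1 = "decimal" then PySem.Int.ofStrBase? num 10
       else if sistema_1 = "hexadecimal" then PySem.Int.ofStrBase? num 16
       else if sistema_1 = "octal" then PySem.Int.ofStrBase? num 8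
       else none) with
    | none => ""          -- int() raised ValueError; outside Pre_
    | some n =>
      if n = 0 then ""    -- Python returns the int 0, not a string; outside Pre_
      else String.mk (pvLoopA n [])

-- ===== PORT B =====
def transformador_binario_alt (sistema_1 : String) (num : String) : String :=
  if sistema_1 = "binario" then num
  else
    match
      (if sistema_1 = "decimal" then PySem.Int.ofStrBase? num 10
       else if sistema_1 = "hexadecimal" then PySem.Int.ofStrBase? num 16
       else if sistema_1 = "octal" then PySem.Int.ofStrBase? num 8
       else none) with
    | none => ""          -- int() raised ValueError; outside Pre_
    | some n =>
      if n = 0 then ""    -- Python returns the int 0, not a string; outside Pre_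
      else
        -- bits collected LSB-first; each str((num >> i) & 1) as its chars; ''.join(reversed(bits))
        let len : Nat := if 0 < n then PySem.Int.bitLength n else 0
        let bits : List (List Char) :=
          (PySem.List.pyRange 0 (len : Int)).foldl
            (fun acc i => acc ++ [PySem.Int.toChars (PySem.Int.band (n >>> i.toNat) 1)]) []
        String.mk bits.reverse.flatten

-- ===== PRECONDITION & SPEC =====
-- Pre_ excludes: an unknown sistema_1 (Python raises TypeError on 'num > 0'), a num that
-- int() cannot parse in the selected base (ValueError), and a num whose value is 0, on which
-- A returns the int 0 — not a value of the declared string type.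
def Pre_transformador_binario (sistema_1 : String) (num : String) : Prop :=
  sistema_1 = "binario" ∨
  (sistema_1 = "decimal" ∧ PySem.Int.ofStrBase? num 10 ≠ none ∧ PySem.Int.ofStrBase? num 10 ≠ some 0) ∨
  (sistema_1 = "hexadecimal" ∧ PySem.Int.ofStrBase? num 16 ≠ none ∧ PySem.Int.ofStrBase? num 16 ≠ some 0) ∨
  (sistema_1 = "octal" ∧ PySem.Int.ofStrBase? num 8 ≠ none ∧ PySem.Int.ofStrBase? num 8 ≠ some 0)
instance (sistema_1 : String) (num : String) : Decidable (Pre_transformador_binario sistema_1 num) := by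
  unfold Pre_transformador_binario; infer_instance

def pvWitness_transformador_binario : String × String := ("decimal", "13")

def Spec_transformador_binario (sistema_1 : String) (num : String) (out : String) : Prop := out = transformador_binario_alt sistema_1 num
instance (sistema_1 : String) (num : String) (out : String) : Decidable (Spec_transformador_binario sistema_1 num out) := by unfold Spec_transformador_binario; infer_instance

-- ===== CLAIM (what is proved, stated in full; the proofs are below) =====
def Claim_equal_transformador_binario : Prop := ∀ (sistema_1 : String) (num : String), Dom_transformador_binario sistema_1 num → Pre_transformador_binario sistema_1 num → Spec_transformador_binario sistema_1 num (transformador_binario sistema_1 num)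

-- ===== LEMMAS AND PROOFS =====

-- the digit list B produces for a positive value m, MSB-first
def pvCanon (m : Nat) : List Char :=
  ((List.range (PySem.Int.bitLength (m : Int))).map
    (fun i => PySem.Int.toChars ((m >>> i % 2 : Nat) : Int))).reverse.flatten

lemma pvShift_succ (m i : Nat) : m >>> (i + 1) = (m / 2) >>> i := by
  simp [Nat.shiftRight_eq_div_pow, Nat.div_div_eq_div_mul, pow_succ]
  ring_nf

lemma pvCanon_step (m : Nat) (_hm : 0 < m / 2) :
    pvCanon m = pvCanon (m / 2) ++ PySem.Int.toChars ((m % 2 : Nat) : Int) := by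
  have hm0 : 0 < m := by omega
  have hmap : List.map ((fun i => PySem.Int.toChars ((m >>> i % 2 : Nat) : Int)) ∘ Nat.succ)
      (List.range (PySem.Int.bitLength ((m / 2 : Nat) : Int)))
      = List.map (fun i => PySem.Int.toChars (((m / 2) >>> i % 2 : Nat) : Int))
      (List.range (PySem.Int.bitLength ((m / 2 : Nat) : Int))) := by
    apply List.map_congr_left
    intro i _
    simp [Function.comp, pvShift_succ]
  unfold pvCanon
  rw [PySem.Int.bitLength_natCast hm0, List.range_succ_eq_map]
  simp only [List.map_cons, List.map_map, List.reverse_cons, List.flatten_append]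
  rw [hmap]
  simp

lemma pvLoopA_eq (m : Nat) : 0 < m → ∀ acc, pvLoopA (m : Int) acc = pvCanon m ++ acc := by
  induction m using Nat.strong_induction_on with
  | _ m ih =>
    intro hm acc
    rw [pvLoopA]
    have hpos : (0:Int) < (m:Int) := by exact_mod_cast hm
    rw [if_pos hpos]
    have hdiv : PySem.Int.floordiv (m:Int) 2 = ((m / 2 : Nat) : Int) := by
      exact_mod_cast PySem.Int.floordiv_natCast m 2
    have hmod : PySem.Int.mod (m:Int) 2 = ((m % 2 : Nat) : Int) := by
      exact_mod_cast PySem.Int.mod_natCast m 2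
    rw [hdiv, hmod]
    by_cases h2 : 0 < m / 2
    · rw [ih (m/2) (by omega) h2, pvCanon_step m h2, List.append_assoc]
    · have h1 : m = 1 := by omega
      subst h1
      norm_num
      rw [pvLoopA]
      norm_num
      have : pvCanon 1 = PySem.Int.toChars ((1:Nat) : Int) := by decide
      rw [this]
      simp

lemma pvCast_shiftRight (m k : Nat) : ((m:Int) >>> (k:Int)) = ((m >>> k : Nat) : Int) :=
  Int.shiftRight_natCast m k

-- B's bit-extraction pass produces pvCanon for a positive value
lemma pvAltBits_eq (m : Nat) :
    ((PySem.List.pyRange 0 ((PySem.Int.bitLength (m : Int)) : Int)).foldl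
      (fun acc i => acc ++ [PySem.Int.toChars (PySem.Int.band ((m:Int) >>> i.toNat) 1)])
      []).reverse.flatten = pvCanon m := by
  rw [PySem.List.foldl_append_singleton_eq_map, PySem.List.pyRange_zero_natCast]
  unfold pvCanon
  simp only [List.nil_append, List.map_map]
  congr 1
  congr 1
  apply List.map_congr_left
  intro i _
  simp only [Function.comp_apply, Int.toNat_natCast, PySem.Int.band_one, pvCast_shiftRight]
  congr 1
  exact_mod_cast PySem.Int.mod_natCast (m >>> i) 2

-- the two loop results agree for every nonzero parsed value
lemma pvMain (n : Int) :
    String.mk (pvLoopA n []) =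
    String.mk ((((PySem.List.pyRange 0 (((if 0 < n then PySem.Int.bitLength n else 0) : Nat) : Int)).foldl
      (fun acc i => acc ++ [PySem.Int.toChars (PySem.Int.band (n >>> i.toNat) 1)]) [])).reverse.flatten) := by
  by_cases hp : 0 < n
  · have hn : n = ((n.toNat : Nat) : Int) := (Int.toNat_of_nonneg (by omega)).symm
    have hm : 0 < n.toNat := by omega
    rw [if_pos hp, hn, pvAltBits_eq n.toNat, pvLoopA_eq n.toNat hm []]
    simp
  · -- n < 0: A's loop body never runs; B's range is empty
    rw [if_neg hp, pvLoopA, if_neg hp]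
    have : PySem.List.pyRange 0 (((0:Nat):Int)) = [] := by decide
    rw [this]
    simp

-- ===== VERDICT (by name: the statement is the Claim_ definition above) =====
theorem transformador_binario_spec : Claim_equal_transformador_binario := by
  intro sistema_1 num _ hpre
  unfold Spec_transformador_binario transformador_binario transformador_binario_alt
  rcases hpre with h | ⟨h, _, h0⟩ | ⟨h, _, h0⟩ | ⟨h, _, h0⟩ <;> subst h
  · simp
  · simp only [if_neg (show ¬("decimal" : String) = "binario" by decide)]
    cases hp : PySem.Int.ofStrBase? num 10 with
    | none => rfl
    | some n =>
      have hn : n ≠ 0 := by rintro rfl; exact h0 hp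
      simp only [if_true, if_neg hn]
      exact pvMain n
  · simp only [if_neg (show ¬("hexadecimal" : String) = "binario" by decide),
        if_neg (show ¬("hexadecimal" : String) = "decimal" by decide)]
    cases hp : PySem.Int.ofStrBase? num 16 with
    | none => rfl
    | some n =>
      have hn : n ≠ 0 := by rintro rfl; exact h0 hp
      simp only [if_true, if_neg hn]
      exact pvMain n
  · simp only [if_neg (show ¬("octal" : String) = "binario" by decide),
        if_neg (show ¬("octal" : String) = "decimal" by decide),
        if_neg (show ¬("octal" : String) = "hexadecimal" by decide)]
    cases hp : PySem.Int.ofStrBase? num 8 with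
    | none => rfl
    | some n =>
      have hn : n ≠ 0 := by rintro rfl; exact h0 hp
      simp only [if_true, if_neg hn]
      exact pvMain n
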